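-- pv_equiv track=rewrite | github.com/UPOD-datascience/CardioNER.nl | src/cardioner/multiclass/loader.py | align_labels_with_tokens_multihead
-- ===== SOURCE A (Python) =====
-- from typing import List, Dict, Optional, Union, Tuple, Literal
--
-- def align_labels_with_tokens_multihead(labels_dict: Dict[str, List[str]], word_ids, bio_label2id: Dict[str, int]):
--     """
--     Align multi-head labels with subword tokens.
--
--     Args:
--         labels_dict: Dict mapping entity types to BIO tag lists
--         word_ids: Word IDs from tokenizer
--         bio_label2id: Mapping of BIO tags to IDs {"O": 0, "B": 1, "I": 2}
--
--     Returns: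
--         Dict mapping entity types to aligned label ID lists
--     """
--     aligned_labels = {}
--
--     for entity_type, labels in labels_dict.items():
--         new_labels = []
--         current_word = None
--         max_label_idx = len(labels) - 1
--
--         for word_id in word_ids:
--             if word_id is None:
--                 # Special token
--                 new_labels.append(-100)
--             elif word_id != current_word:
--                 # Start of a new word
--                 current_word = word_id
--                 if word_id > max_label_idx:
--                     new_labels.append(-100)
--                 else:
--                     label_str = labels[word_id]
--                     new_labels.append(bio_label2id.get(label_str, 0))
--             else:
--                 # Same word as previous token (subword)
--                 if word_id > max_label_idx:
--                     new_labels.append(-100)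
--                 else:
--                     label_str = labels[word_id]
--                     label_id = bio_label2id.get(label_str, 0)
--                     # If label is B (1), change to I (2) for continuation
--                     if label_id == 1:  # B tag
--                         label_id = 2  # Change to I tag
--                     new_labels.append(label_id)
--
--         aligned_labels[entity_type] = new_labels
--
--     return aligned_labels
-- ===== SOURCE B (Python) =====
-- def align_labels_with_tokens_multihead(labels_dict, word_ids, bio_label2id):
--     # Precompute, once for all entity types, each token's (word_id, is_continuation)
--     # flag; then each entity type is a pure map over these flags using per-entity
--     # label-id tables (first-token ids and continuation ids with B mapped to I).
--     flags = []
--     prev = None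
--     for w in word_ids:
--         flags.append((w, w is not None and w == prev))
--         if w is not None:
--             prev = w
--     aligned = {}
--     for entity_type, labels in labels_dict.items():
--         first = [bio_label2id.get(l, 0) for l in labels]
--         cont = [2 if v == 1 else v for v in first]
--         n = len(labels)
--         aligned[entity_type] = [
--             -100 if w is None or w >= n else (cont[w] if c else first[w])
--             for (w, c) in flags
--         ]
--     return aligned
-- ===== Notes on version B (the rewrite author's own statement) =====
-- stated objective: alternative
-- what changed: Replaces A's per-entity current_word state machine with a single shared pass that precomputes each token's (word_id, is-continuation) flag, and turns each entity head into a pure map over those flags using per-entity precomputed first/continuation label-id tables instead of per-token dict lookups.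
import Mathlib
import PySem

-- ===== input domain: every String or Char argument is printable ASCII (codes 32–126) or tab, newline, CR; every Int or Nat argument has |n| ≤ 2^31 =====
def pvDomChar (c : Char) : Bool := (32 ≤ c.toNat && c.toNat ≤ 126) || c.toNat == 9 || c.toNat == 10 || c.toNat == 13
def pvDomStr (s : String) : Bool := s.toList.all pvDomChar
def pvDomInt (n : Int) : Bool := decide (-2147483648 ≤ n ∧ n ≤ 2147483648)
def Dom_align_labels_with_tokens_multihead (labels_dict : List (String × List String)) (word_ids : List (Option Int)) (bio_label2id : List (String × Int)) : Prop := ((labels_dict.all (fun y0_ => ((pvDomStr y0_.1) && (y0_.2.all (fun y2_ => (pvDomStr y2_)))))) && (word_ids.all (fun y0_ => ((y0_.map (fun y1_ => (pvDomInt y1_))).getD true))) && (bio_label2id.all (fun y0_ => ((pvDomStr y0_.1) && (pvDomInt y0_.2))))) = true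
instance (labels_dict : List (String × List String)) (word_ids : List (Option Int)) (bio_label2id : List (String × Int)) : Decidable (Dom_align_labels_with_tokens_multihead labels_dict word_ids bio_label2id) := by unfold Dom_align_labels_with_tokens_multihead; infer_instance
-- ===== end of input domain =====

-- B precomputes the per-token (word_id, is-continuation) flags once and turns each
-- entity head into a pure map over them using precomputed label-id tables (objective: alternative decomposition).


-- ===== PORT A =====
-- the inner `for word_id in word_ids` loop body; state = (new_labels, current_word)
def pvA_step (labels : List String) (bio : PySem.Dict String Int) (st : List Int × Option Int) (ow : Option Int) : List Int × Option Int :=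
  match ow with
  | none => (st.1 ++ [-100], st.2)
  | some w =>
    if some w ≠ st.2 then
      if w > (labels.length : Int) - 1 then (st.1 ++ [-100], some w)
      else (st.1 ++ [bio.getD (PySem.List.pyGetD labels w "") 0], some w)
    else
      if w > (labels.length : Int) - 1 then (st.1 ++ [-100], st.2)
      else
        let lid := bio.getD (PySem.List.pyGetD labels w "") 0
        (st.1 ++ [if lid = 1 then 2 else lid], st.2)

-- one iteration of the outer `for entity_type, labels in labels_dict.items()` loop
def pvA_entry (bio : PySem.Dict String Int) (word_ids : List (Option Int)) (p : String × List String) : String × List Int :=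
  (p.1, (word_ids.foldl (pvA_step p.2 bio) ([], none)).1)

def align_labels_with_tokens_multihead (labels_dict : List (String × List String)) (word_ids : List (Option Int)) (bio_label2id : List (String × Int)) : List (String × List Int) :=
  let bio := PySem.Dict.ofList bio_label2id
  ((PySem.Dict.ofList labels_dict).items).foldl (fun acc p => acc ++ [pvA_entry bio word_ids p]) []

-- ===== PORT B =====
-- flags.append((w, w is not None and w == prev)); prev updated on non-None
def pvB_flagStep (st : List (Option Int × Bool) × Option Int) (ow : Option Int) : List (Option Int × Bool) × Option Int :=
  (st.1 ++ [(ow, ow.isSome && ow == st.2)], if ow.isSome then ow else st.2)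

-- the comprehension body: -100 if w is None or w >= n else (cont[w] if c else first[w])
def pvB_tok (n : Int) (first cont : List Int) (wc : Option Int × Bool) : Int :=
  match wc.1 with
  | none => -100
  | some w => if w ≥ n then -100 else if wc.2 then PySem.List.pyGetD cont w 0 else PySem.List.pyGetD first w 0

-- one iteration of the `for entity_type, labels in labels_dict.items()` loop of B
def pvB_entry (bio : PySem.Dict String Int) (flags : List (Option Int × Bool)) (p : String × List String) : String × List Int :=
  let first := p.2.map (fun l => bio.getD l 0)
  let cont := first.map (fun v => if v = 1 then 2 else v)
  (p.1, flags.map (pvB_tok (p.2.length : Int) first cont))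

def align_labels_with_tokens_multihead_alt (labels_dict : List (String × List String)) (word_ids : List (Option Int)) (bio_label2id : List (String × Int)) : List (String × List Int) :=
  let bio := PySem.Dict.ofList bio_label2id
  let flags := (word_ids.foldl pvB_flagStep ([], none)).1
  ((PySem.Dict.ofList labels_dict).items).foldl (fun acc p => acc ++ [pvB_entry bio flags p]) []

-- ===== PRECONDITION & SPEC =====
-- A raises IndexError (labels[word_id]) exactly when some entity's label list is shorter
-- than |word_id| for a negative word_id; Pre_ excludes exactly those inputs (B raises there too).
def Pre_align_labels_with_tokens_multihead (labels_dict : List (String × List String)) (word_ids : List (Option Int)) (bio_label2id : List (String × Int)) : Prop :=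
  ∀ p ∈ (PySem.Dict.ofList labels_dict).items, ∀ ow ∈ word_ids, ∀ w : Int, ow = some w → -(p.2.length : Int) ≤ w
instance (labels_dict : List (String × List String)) (word_ids : List (Option Int)) (bio_label2id : List (String × Int)) : Decidable (Pre_align_labels_with_tokens_multihead labels_dict word_ids bio_label2id) := by unfold Pre_align_labels_with_tokens_multihead; infer_instance

def pvWitness_align_labels_with_tokens_multihead : (List (String × List String)) × List (Option Int) × (List (String × Int)) :=
  ([("dis", ["B", "I", "O"])], [none, some 0, some 0, some 1, some 5, none], [("O", 0), ("B", 1), ("I", 2)])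

def Spec_align_labels_with_tokens_multihead (labels_dict : List (String × List String)) (word_ids : List (Option Int)) (bio_label2id : List (String × Int)) (out : List (String × List Int)) : Prop := out = align_labels_with_tokens_multihead_alt labels_dict word_ids bio_label2id
instance (labels_dict : List (String × List String)) (word_ids : List (Option Int)) (bio_label2id : List (String × Int)) (out : List (String × List Int)) : Decidable (Spec_align_labels_with_tokens_multihead labels_dict word_ids bio_label2id out) := by unfold Spec_align_labels_with_tokens_multihead; infer_instance

-- ===== CLAIM (what is proved, stated in full; the proofs are below) =====
def Claim_equal_align_labels_with_tokens_multihead : Prop := ∀ (labels_dict : List (String × List String)) (word_ids : List (Option Int)) (bio_label2id : List (String × Int)), Dom_align_labels_with_tokens_multihead labels_dict word_ids bio_label2id → Pre_align_labels_with_tokens_multihead labels_dict word_ids bio_label2id → Spec_align_labels_with_tokens_multihead labels_dict word_ids bio_label2id (align_labels_with_tokens_multihead labels_dict word_ids bio_label2id)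

-- ===== LEMMAS AND PROOFS =====

-- the flag list B's first pass produces, as a structural recursion (proof helper)
def pvFlags (ws : List (Option Int)) (cw : Option Int) : List (Option Int × Bool) :=
  match ws with
  | [] => []
  | ow :: rest => (ow, ow.isSome && ow == cw) :: pvFlags rest (if ow.isSome then ow else cw)

lemma pvB_flags_fold (ws : List (Option Int)) (acc : List (Option Int × Bool)) (cw : Option Int) :
    (ws.foldl pvB_flagStep (acc, cw)).1 = acc ++ pvFlags ws cw := by
  induction ws generalizing acc cw with
  | nil => simp [pvFlags]
  | cons ow rest ih => simp [pvFlags, pvB_flagStep, ih]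

lemma pyGetD_default_irrel {α : Type} (xs : List α) (i : Int) (d d' : α)
    (h : PySem.Raise.InRange xs.length i) : PySem.List.pyGetD xs i d = PySem.List.pyGetD xs i d' := by
  cases hg : PySem.List.pyGet? xs i with
  | none => exact absurd h ((PySem.List.pyGet?_eq_none_iff xs i).mp hg)
  | some x => simp [PySem.List.pyGetD, hg]

-- the inner loop of A produces exactly B's map over the flags
lemma pv_inner (labels : List String) (bio : PySem.Dict String Int) (ws : List (Option Int))
    (hpre : ∀ ow ∈ ws, ∀ w : Int, ow = some w → -(labels.length : Int) ≤ w) :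
    ∀ (cw : Option Int) (acc : List Int),
      (ws.foldl (pvA_step labels bio) (acc, cw)).1
        = acc ++ (pvFlags ws cw).map
            (pvB_tok (labels.length : Int) (labels.map (fun l => bio.getD l 0))
              ((labels.map (fun l => bio.getD l 0)).map (fun v => if v = 1 then 2 else v))) := by
  induction ws with
  | nil => intro cw acc; simp [pvFlags]
  | cons ow rest ih =>
    intro cw acc
    have hrest : ∀ ow ∈ rest, ∀ w : Int, ow = some w → -(labels.length : Int) ≤ w := by
      intro o ho; exact hpre o (List.mem_cons_of_mem _ ho)
    cases ow with
    | none =>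
      simp only [List.foldl_cons, pvA_step, pvFlags]
      rw [ih hrest]
      simp [pvB_tok]
    | some w =>
      have hw : -(labels.length : Int) ≤ w := hpre (some w) (by simp) w rfl
      by_cases hc : some w = cw
      · -- continuation token (same word id as the previous non-None token)
        subst hc
        simp only [List.foldl_cons, pvA_step, pvFlags]
        rw [if_neg (by simp)]
        by_cases hout : w ≥ (labels.length : Int)
        · rw [if_pos (by omega), ih hrest]
          simp [pvB_tok, hout]
        · have hin : PySem.Raise.InRange labels.length w := ⟨hw, by omega⟩
          have hcont : PySem.List.pyGetD ((labels.map (fun l => bio.getD l 0)).map (fun v => if v = 1 then 2 else v)) w 0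
              = (fun v : Int => if v = 1 then 2 else v) (bio.getD (PySem.List.pyGetD labels w "") 0) := by
            rw [pyGetD_default_irrel _ w 0 ((fun v : Int => if v = 1 then 2 else v) 0) (by simpa using hin),
              PySem.List.pyGetD_map (fun v : Int => if v = 1 then 2 else v) _ w 0,
              pyGetD_default_irrel _ w (0 : Int) (bio.getD "" 0) (by simpa using hin),
              PySem.List.pyGetD_map (fun l => bio.getD l 0) labels w ""]
          rw [if_neg (by omega), ih hrest]
          simp [pvB_tok, hout]
          rw [← List.map_map, hcont]
      · -- first token of a new word
        have hbeq : ((some w == cw) = false) := by cases cw <;> simp_all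
        simp only [List.foldl_cons, pvA_step, pvFlags]
        rw [if_pos (by simpa using hc)]
        by_cases hout : w ≥ (labels.length : Int)
        · rw [if_pos (by omega), ih hrest]
          simp [pvB_tok, hbeq, hout]
        · have hin : PySem.Raise.InRange labels.length w := ⟨hw, by omega⟩
          have hfirst : PySem.List.pyGetD (labels.map (fun l => bio.getD l 0)) w 0
              = bio.getD (PySem.List.pyGetD labels w "") 0 := by
            rw [pyGetD_default_irrel _ w 0 (bio.getD "" 0) (by simpa using hin),
              PySem.List.pyGetD_map (fun l => bio.getD l 0) labels w ""]
          rw [if_neg (by omega), ih hrest]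
          simp [pvB_tok, hbeq, hout, hfirst]

-- ===== VERDICT (by name: the statement is the Claim_ definition above) =====
theorem align_labels_with_tokens_multihead_spec : Claim_equal_align_labels_with_tokens_multihead := by
  intro labels_dict word_ids bio_label2id _ hpre
  unfold Spec_align_labels_with_tokens_multihead
  unfold align_labels_with_tokens_multihead align_labels_with_tokens_multihead_alt
  simp only [PySem.List.foldl_append_singleton_eq_map, List.nil_append]
  apply List.map_congr_left
  intro p hp
  unfold pvA_entry pvB_entry
  rw [pv_inner p.2 _ word_ids (fun ow ho w hw => hpre p hp ow ho w hw), List.nil_append,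
    pvB_flags_fold, List.nil_append]
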